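-- pv_equiv track=rewrite | github.com/daniel-reich/ubiquitous-fiesta | SaZodzHyFoSv9XKPX_21.py | domino_chain
-- ===== SOURCE A (Python) =====
-- def domino_chain(dominos):
--   arr = list(dominos)
--   indd = None
--   for ind, d in enumerate(dominos):
--     if d not in ('/', ' '):
--       arr[ind] = '/'
--     else:
--       break
--   return "".join(arr)
-- ===== SOURCE B (Python) =====
-- def domino_chain(dominos):
--   p = next((i for i, c in enumerate(dominos) if c in ('/', ' ')), len(dominos))
--   return '/' * p + dominos[p:]
-- ===== Notes on version B (the rewrite author's own statement) =====
-- stated objective: simpler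
-- what changed: Instead of copying the string to a list and overwriting characters one by one until a break, B finds the length p of the leading run of non-'/'-non-space characters and builds the result directly as '/'*p + dominos[p:].
import Mathlib
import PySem

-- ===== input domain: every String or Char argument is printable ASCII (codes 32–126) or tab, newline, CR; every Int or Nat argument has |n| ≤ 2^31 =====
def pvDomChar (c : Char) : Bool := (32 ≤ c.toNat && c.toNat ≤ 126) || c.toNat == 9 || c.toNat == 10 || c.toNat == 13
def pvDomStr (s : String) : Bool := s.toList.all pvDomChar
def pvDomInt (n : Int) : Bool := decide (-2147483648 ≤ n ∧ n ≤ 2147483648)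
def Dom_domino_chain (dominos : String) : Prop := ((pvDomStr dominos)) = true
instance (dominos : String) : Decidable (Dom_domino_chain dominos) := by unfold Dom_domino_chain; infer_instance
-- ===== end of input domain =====

-- B replaces A's list-copy-and-mutate loop with a find-prefix-length-then-construct
-- decomposition ('/'*p + dominos[p:]); objective: simpler.


-- ===== PORT A =====
-- enumerate(dominos) starting at index k
def pvEnumFrom (k : Nat) : List Char → List (Nat × Char)
  | [] => []
  | c :: t => (k, c) :: pvEnumFrom (k + 1) t

-- the for-loop with break: mutate arr[ind] := '/' until a '/' or ' ' is met
def pvALoop (arr : List Char) : List (Nat × Char) → List Char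
  | [] => arr
  | (ind, d) :: rest =>
      if ¬ (d = '/' ∨ d = ' ') then pvALoop (arr.set ind '/') rest
      else arr

def domino_chain (dominos : String) : String :=
  let arr := dominos.toList
  String.mk (pvALoop arr (pvEnumFrom 0 dominos.toList))

-- ===== PORT B =====
-- p = first index whose char is '/' or ' ' (= length of the leading run of others)
def domino_chain_alt (dominos : String) : String :=
  let l := dominos.toList
  let p := (l.takeWhile (fun c => ¬ (c = '/' ∨ c = ' ') : Char → Bool)).length
  String.mk (List.replicate p '/' ++ l.drop p)

-- ===== PRECONDITION & SPEC =====
def Spec_domino_chain (dominos : String) (out : String) : Prop := out = domino_chain_alt dominos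
instance (dominos : String) (out : String) : Decidable (Spec_domino_chain dominos out) := by unfold Spec_domino_chain; infer_instance

-- ===== CLAIM (what is proved, stated in full; the proofs are below) =====
def Claim_equal_domino_chain : Prop := ∀ (dominos : String), Dom_domino_chain dominos → Spec_domino_chain dominos (domino_chain dominos)

-- ===== LEMMAS AND PROOFS =====
theorem pvALoop_eq (l : List Char) : ∀ (k : Nat) (arr : List Char), arr.drop k = l →
    pvALoop arr (pvEnumFrom k l) =
      arr.take k ++ List.replicate ((l.takeWhile (fun c => ¬ (c = '/' ∨ c = ' ') : Char → Bool)).length) '/'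
        ++ l.drop ((l.takeWhile (fun c => ¬ (c = '/' ∨ c = ' ') : Char → Bool)).length) := by
  induction l with
  | nil =>
      intro k arr h
      have hle : arr.length ≤ k := by
        have := congrArg List.length h
        simp at this
        omega
      simp [pvEnumFrom, pvALoop, List.take_of_length_le hle]
  | cons d t ih =>
      intro k arr h
      have hk : k < arr.length := by
        have := congrArg List.length h
        simp at this
        omega
      by_cases hd : d = '/' ∨ d = ' '
      · have hb : ((fun c => (¬ (c = '/' ∨ c = ' ') : Bool)) d) = false := by
          simp
          tauto
        simp only [pvEnumFrom, pvALoop, if_neg (not_not_intro hd),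
          List.takeWhile_cons, hb, List.length_nil, List.replicate_zero,
          List.nil_append, List.drop_zero, Bool.false_eq_true, if_false]
        rw [List.append_nil, ← h]
        exact (List.take_append_drop k arr).symm
      · have hb : ((fun c => (¬ (c = '/' ∨ c = ' ') : Bool)) d) = true := by
          simp
          tauto
        have hdrop : (arr.set k '/').drop (k + 1) = t := by
          rw [List.drop_set]
          simp
          have := congrArg (List.drop 1) h
          simpa [List.drop_drop] using this
        have htake : (arr.set k '/').take (k + 1) = arr.take k ++ ['/'] := by
          rw [List.set_eq_take_cons_drop _ hk, List.take_append]
          have h1 : (arr.take k).length = k := by simp [hk.le]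
          rw [List.take_of_length_le (by omega)]
          simp [h1]
        simp only [pvEnumFrom, pvALoop, if_pos hd, List.takeWhile_cons, hb, if_true,
          List.length_cons, ih (k + 1) (arr.set k '/') hdrop, htake, List.replicate_succ,
          List.drop_succ_cons]
        simp

theorem domino_chain_spec : Claim_equal_domino_chain := by
  intro dominos _
  unfold Spec_domino_chain domino_chain domino_chain_alt
  simp only
  rw [pvALoop_eq dominos.toList 0 dominos.toList (by simp)]
  simp
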